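-- pv_equiv track=rewrite | github.com/guilhermednztt/Algoritmo_Recomendacao | mathematical.py | somaTransversal
-- ===== SOURCE A (Python) =====
-- def somaTransversal(valores):
--     """
--     Soma os valores das colunas e retorna.\n
--     """
--     linhas = len(valores)
--     colunas = len(valores[0])
--     somatorio = [0] * colunas
--
--     for x in range(linhas):
--         for y in range(colunas):
--             somatorio[y] += valores[x][y]
--
--     return somatorio
-- ===== SOURCE B (Python) =====
-- def somaTransversal(valores):
--     """
--     Soma os valores das colunas e retorna.\n
--     """
--     def soma(linhas, acc):
--         if not linhas:
--             return acc
--         return soma(linhas[1:], [a + b for a, b in zip(acc, linhas[0])])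
--     return soma(valores, [0] * len(valores[0]))
-- ===== Notes on version B (the rewrite author's own statement) =====
-- stated objective: alternative
-- what changed: Index-free structural recursion over the row list, folding with element-wise vector addition via zip, instead of A's nested index loops mutating a shared accumulator list.
import Mathlib
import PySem

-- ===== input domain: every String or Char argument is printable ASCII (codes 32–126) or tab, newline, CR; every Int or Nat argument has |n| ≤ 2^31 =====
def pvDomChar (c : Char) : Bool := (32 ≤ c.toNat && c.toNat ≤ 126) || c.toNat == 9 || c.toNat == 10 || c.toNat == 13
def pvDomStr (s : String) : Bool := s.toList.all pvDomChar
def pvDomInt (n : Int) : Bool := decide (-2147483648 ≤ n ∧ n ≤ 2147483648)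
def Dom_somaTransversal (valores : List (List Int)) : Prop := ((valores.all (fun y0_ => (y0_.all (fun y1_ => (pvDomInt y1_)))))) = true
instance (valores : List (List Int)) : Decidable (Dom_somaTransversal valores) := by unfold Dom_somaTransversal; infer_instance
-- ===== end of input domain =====

-- B replaces A's nested index loops over a shared mutable accumulator with an index-free
-- structural recursion over the rows, combining by element-wise (zip) vector addition;
-- objective: alternative decomposition, same cost.

-- ===== PORT A =====
-- valores[0] is ported with pyGetD; the index accesses somatorio[y] / valores[x][y] are
-- in range on Pre_ (valores nonempty, every row at least as long as row 0), where getD is exact.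
def somaTransversal (valores : List (List Int)) : List Int :=
  let linhas := valores.length
  let colunas := (PySem.List.pyGetD valores 0 []).length
  let somatorio := List.replicate colunas (0 : Int)
  (List.range linhas).foldl (fun som x =>
    (List.range colunas).foldl (fun som y =>
      som.set y (som.getD y 0 + (valores.getD x []).getD y 0)) som) somatorio

-- ===== PORT B =====
-- [a + b for a, b in zip(acc, row)]
def pvAddVec (acc row : List Int) : List Int :=
  (acc.zip row).map (fun p => p.1 + p.2)

-- the inner recursive helper 'soma'
def pvSoma : List (List Int) → List Int → List Int
  | [], acc => acc
  | r :: t, acc => pvSoma t (pvAddVec acc r)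

def somaTransversal_alt (valores : List (List Int)) : List Int :=
  pvSoma valores (List.replicate (PySem.List.pyGetD valores 0 []).length (0 : Int))

-- ===== PRECONDITION & SPEC =====
-- Python A raises IndexError on an empty matrix (reading valores[0]) and on any row shorter
-- than row 0 (valores[x][y]); exactly those inputs are excluded.
def Pre_somaTransversal (valores : List (List Int)) : Prop :=
  valores ≠ [] ∧ ∀ r ∈ valores, (valores.headD []).length ≤ r.length
instance (valores : List (List Int)) : Decidable (Pre_somaTransversal valores) := by unfold Pre_somaTransversal; infer_instance
def pvWitness_somaTransversal : List (List Int) := [[1, 2], [3, 4]]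

def Spec_somaTransversal (valores : List (List Int)) (out : List Int) : Prop := out = somaTransversal_alt valores
instance (valores : List (List Int)) (out : List Int) : Decidable (Spec_somaTransversal valores out) := by unfold Spec_somaTransversal; infer_instance

-- ===== CLAIM (what is proved, stated in full; the proofs are below) =====
def Claim_equal_somaTransversal : Prop := ∀ (valores : List (List Int)), Dom_somaTransversal valores → Pre_somaTransversal valores → Spec_somaTransversal valores (somaTransversal valores)

-- ===== LEMMAS AND PROOFS =====

-- A fold over `range l.length` that only reads `l.getD i d` is a fold over `l`.
theorem pv_foldl_range_getD {α β : Type} (f : β → α → β) (d : α) :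
    ∀ (l : List α) (init : β),
      (List.range l.length).foldl (fun b i => f b (l.getD i d)) init = l.foldl f init := by
  intro l
  induction l with
  | nil => intro init; simp
  | cons a t ih =>
    intro init
    rw [List.length_cons, List.range_succ_eq_map, List.foldl_cons, List.foldl_map]
    simpa using ih (f init a)

-- The inner set-loop of A, on a list of length ≥ c, rewrites the first c entries pointwise.
theorem pv_setfold (row : List Int) :
    ∀ (c : Nat) (s : List Int), c ≤ s.length →
      (List.range c).foldl (fun s y => s.set y (s.getD y 0 + row.getD y 0)) s
        = ((List.range c).map (fun y => s.getD y 0 + row.getD y 0)) ++ s.drop c := by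
  intro c
  induction c with
  | zero => intro s _; simp
  | succ c ih =>
    intro s h
    have hc : c < s.length := Nat.lt_of_lt_of_le (Nat.lt_succ_self c) h
    rw [List.range_succ, List.foldl_append, ih s (Nat.le_of_lt hc)]
    have hdrop : s.drop c = s[c] :: s.drop (c + 1) := List.drop_eq_getElem_cons hc
    have hlenP : ((List.range c).map (fun y => s.getD y 0 + row.getD y 0)).length = c := by simp
    have hgetD : (((List.range c).map (fun y => s.getD y 0 + row.getD y 0)) ++ s.drop c).getD c 0
        = s.getD c 0 := by
      rw [List.getD_append_right _ _ _ _ (le_of_eq hlenP), hlenP, Nat.sub_self, hdrop]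
      simp
    rw [List.foldl_cons, List.foldl_nil, hgetD]
    rw [List.set_append_right _ _ (le_of_eq hlenP), hlenP, Nat.sub_self, hdrop]
    simp [List.map_append]
    rw [hdrop, List.set_cons_zero]

-- The inner loop applied to a range-map accumulator.
theorem pv_inner (c : Nat) (g : Nat → Int) (row : List Int) :
    (List.range c).foldl (fun s y => s.set y (s.getD y 0 + row.getD y 0))
        ((List.range c).map g)
      = (List.range c).map (fun y => g y + row.getD y 0) := by
  rw [pv_setfold row c _ (by simp)]
  have h1 : ((List.range c).map g).drop c = [] := by
    apply List.drop_eq_nil_of_le; simp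
  rw [h1, List.append_nil]
  apply List.map_congr_left
  intro y hy
  have hyc : y < c := List.mem_range.mp hy
  have : ((List.range c).map g).getD y 0 = g y := by
    rw [List.getD_eq_getElem _ _ (by simpa using hyc)]
    simp
  rw [this]

-- The two range-index loops of A, re-read as a fold over the row list itself.
theorem pv_rows (c : Nat) (l : List (List Int)) (init : List Int) :
    (List.range l.length).foldl (fun som x =>
        (List.range c).foldl (fun s y => s.set y (s.getD y 0 + (l.getD x []).getD y 0)) som) init
      = l.foldl (fun som row =>
        (List.range c).foldl (fun s y => s.set y (s.getD y 0 + row.getD y 0)) som) init :=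
  pv_foldl_range_getD (fun som row =>
    (List.range c).foldl (fun s y => s.set y (s.getD y 0 + row.getD y 0)) som) [] l init

-- B's zip-addition of a range-map accumulator with a row of length ≥ c, pointwise.
theorem pv_addVec (c : Nat) (g : Nat → Int) (row : List Int) (h : c ≤ row.length) :
    pvAddVec ((List.range c).map g) row
      = (List.range c).map (fun y => g y + row.getD y 0) := by
  unfold pvAddVec
  apply List.ext_getElem
  · simp [Nat.min_eq_left h]
  · intro i h1 h2
    have hic : i < c := by simpa using h2
    have hir : i < row.length := Nat.lt_of_lt_of_le hic h
    simp [List.getElem_zip, List.getD, List.getElem?_eq_getElem hir]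

-- Both loops, started on the same range-map accumulator, agree step for step
-- when every row has length ≥ c.
theorem pv_main (c : Nat) :
    ∀ (rows : List (List Int)) (g : Nat → Int), (∀ r ∈ rows, c ≤ r.length) →
      rows.foldl (fun som row =>
          (List.range c).foldl (fun s y => s.set y (s.getD y 0 + row.getD y 0)) som)
        ((List.range c).map g)
      = pvSoma rows ((List.range c).map g) := by
  intro rows
  induction rows with
  | nil => intro g _; simp [pvSoma]
  | cons row t ih =>
    intro g h
    have hrow : c ≤ row.length := h row (List.mem_cons_self ..)
    rw [List.foldl_cons, pv_inner c g row]
    show _ = pvSoma t (pvAddVec ((List.range c).map g) row)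
    rw [pv_addVec c g row hrow]
    exact ih _ (fun r hr => h r (List.mem_cons_of_mem _ hr))

-- ===== VERDICT (by name: the statement is the Claim_ definition above) =====
theorem somaTransversal_spec : Claim_equal_somaTransversal := by
  intro valores _ hpre
  show somaTransversal valores = somaTransversal_alt valores
  obtain ⟨hne, hrows⟩ := hpre
  have hhead : PySem.List.pyGetD valores 0 [] = valores.headD [] := by
    cases valores with
    | nil => simp at hne
    | cons a t => simp [PySem.List.pyGetD_zero_cons]
  set c := (PySem.List.pyGetD valores 0 []).length with hc
  have hA : somaTransversal valores
      = (List.range valores.length).foldl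
          (fun som x =>
            (List.range c).foldl
              (fun s y => s.set y (s.getD y 0 + (valores.getD x []).getD y 0)) som)
          (List.replicate c (0 : Int)) := rfl
  have hrep : List.replicate c (0 : Int)
      = (List.range c).map (fun _ => (0 : Int)) := by simp
  rw [hA, hrep, pv_rows, pv_main c valores _ (by
    intro r hr
    rw [hc, hhead]
    exact hrows r hr)]
  unfold somaTransversal_alt
  rw [hrep]
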